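-- pv_equiv track=rewrite | github.com/LazyRacc00n/disentanglement_lib | reproduce_all_experiments/disentanglement_utils.py | check_overlap_factors
-- ===== SOURCE A (Python) =====
-- def check_overlap_factors(dict_association):
--     dict_overlap = {}
--
--     for factor_i, latents_i in dict_association.items():
--
--         overlap = 0
--         for factor_j, latents_j in dict_association.items():
--
--             if factor_j == factor_i:
--                 continue
--
--             overlap += len(set(latents_i) & set(latents_j))
--         dict_overlap[factor_i] = overlap
--     return dict_overlap
-- ===== SOURCE B (Python) =====
-- def check_overlap_factors(dict_association):
--     # one pass to count, per latent, how many factors use it; then each factor's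
--     # overlap is sum over its distinct latents of (count - 1)
--     count = {}
--     for latents in dict_association.values():
--         for l in set(latents):
--             count[l] = count.get(l, 0) + 1
--     return {factor: sum(count[l] - 1 for l in set(latents))
--             for factor, latents in dict_association.items()}
-- ===== Notes on version B (the rewrite author's own statement) =====
-- stated objective: faster
-- what changed: replaces the quadratic all-pairs set-intersection loop by a single per-latent usage counter: overlap of a factor = sum over its distinct latents of (count-1)
import Mathlib
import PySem

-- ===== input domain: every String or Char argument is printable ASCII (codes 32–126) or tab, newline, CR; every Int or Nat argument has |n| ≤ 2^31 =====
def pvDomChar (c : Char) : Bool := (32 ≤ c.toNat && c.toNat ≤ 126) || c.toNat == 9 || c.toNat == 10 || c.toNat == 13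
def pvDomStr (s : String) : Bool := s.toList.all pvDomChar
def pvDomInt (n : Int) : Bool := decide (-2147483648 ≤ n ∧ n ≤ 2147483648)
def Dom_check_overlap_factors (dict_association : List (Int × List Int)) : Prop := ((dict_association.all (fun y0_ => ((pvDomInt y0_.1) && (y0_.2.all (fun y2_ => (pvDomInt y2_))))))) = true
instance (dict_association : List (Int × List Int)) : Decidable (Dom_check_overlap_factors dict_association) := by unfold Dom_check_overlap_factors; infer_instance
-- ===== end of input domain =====

-- B replaces A's all-pairs set-intersection loop by a single per-latent usage counter (faster, asymptotic).
-- Both ports read the association list with Python dict semantics (the Python function receives a dict).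

-- ===== PORT A =====
def check_overlap_factors (dict_association : List (Int × List Int)) : List (Int × Int) :=
  let items := (PySem.Dict.ofList dict_association).items
  (items.foldl
    (fun dict_overlap p =>
      dict_overlap.insert p.1
        (items.foldl
          (fun overlap q =>
            if q.1 == p.1 then overlap
            else overlap +
              ((PySem.Set.inter (PySem.Set.ofList p.2) (PySem.Set.ofList q.2)).length : Int))
          0))
    PySem.Dict.empty).items

-- ===== PORT B =====
def check_overlap_factors_alt (dict_association : List (Int × List Int)) : List (Int × Int) :=
  let dd := PySem.Dict.ofList dict_association
  let count : PySem.Dict Int Int :=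
    dd.values.foldl
      (fun c latents =>
        (PySem.Set.ofList latents).foldl (fun c l => c.insert l (c.getD l 0 + 1)) c)
      PySem.Dict.empty
  -- count[l] in Source B never raises (every l of a factor is counted at least once); getD is exact here
  dd.items.map (fun p => (p.1, ((PySem.Set.ofList p.2).map (fun l => count.getD l 0 - 1)).sum))

-- ===== PRECONDITION & SPEC =====
def Spec_check_overlap_factors (dict_association : List (Int × List Int)) (out : List (Int × Int)) : Prop := out = check_overlap_factors_alt dict_association
instance (dict_association : List (Int × List Int)) (out : List (Int × Int)) : Decidable (Spec_check_overlap_factors dict_association out) := by unfold Spec_check_overlap_factors; infer_instance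

-- ===== CLAIM (what is proved, stated in full; the proofs are below) =====
def Claim_equal_check_overlap_factors : Prop := ∀ (dict_association : List (Int × List Int)), Dom_check_overlap_factors dict_association → Spec_check_overlap_factors dict_association (check_overlap_factors dict_association)

-- ===== LEMMAS AND PROOFS =====

-- B's counter dict: its value at l is the number of entries whose latent list contains l
theorem countDict_getD (vals : List (List Int)) (c : PySem.Dict Int Int) (l : Int) :
    (vals.foldl
      (fun c latents =>
        (PySem.Set.ofList latents).foldl (fun c x => c.insert x (c.getD x 0 + 1)) c)
      c).getD l 0
    = c.getD l 0 + ((vals.countP (fun v => decide (l ∈ v)) : Nat) : Int) := by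
  induction vals generalizing c with
  | nil => simp
  | cons v vs ih =>
    simp only [List.foldl_cons, List.countP_cons]
    rw [ih, PySem.Dict.getD_foldl_insert_add_one]
    by_cases h : l ∈ v
    · have hc : (PySem.Set.ofList v).count l = 1 :=
        List.count_eq_one_of_mem (PySem.Set.nodup_ofList v) ((PySem.Set.mem_ofList v l).2 h)
      simp [h]; ring
    · have hc : (PySem.Set.ofList v).count l = 0 :=
        List.count_eq_zero.2 (fun hm => h ((PySem.Set.mem_ofList v l).1 hm))
      simp [hc, h]

-- |set(a) & set(b)| as a 0/1 sum over the distinct elements of a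
theorem inter_len_eq (a b : List Int) :
    ((PySem.Set.inter (PySem.Set.ofList a) (PySem.Set.ofList b)).length : Int)
    = ((PySem.Set.ofList a).map (fun l => if l ∈ b then (1 : Int) else 0)).sum := by
  have h1 : ((PySem.Set.ofList a).map
        (fun l => if (PySem.Set.ofList b).contains l = true then (1 : Int) else 0)).sum
      = (((PySem.Set.ofList a).countP (fun l => (PySem.Set.ofList b).contains l) : Nat) : Int) :=
    PySem.List.sum_map_ite_one_zero _ _
  have h2 : PySem.Set.inter (PySem.Set.ofList a) (PySem.Set.ofList b)
      = (PySem.Set.ofList a).filter (fun x => (PySem.Set.ofList b).contains x) := rfl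
  rw [h2, ← List.countP_eq_length_filter, ← h1]
  congr 1
  apply List.map_congr_left
  intro l _
  by_cases hb : l ∈ b
  · simp [hb]
  · simp [hb]

-- exchange the order of a double sum
theorem sum_swap_list {α β : Type} (L : List α) (S : List β) (f : β → α → Int) :
    (L.map (fun q => (S.map (fun l => f l q)).sum)).sum
    = (S.map (fun l => (L.map (fun q => f l q)).sum)).sum := by
  induction L with
  | nil => simp
  | cons q L ih =>
    simp only [List.map_cons, List.sum_cons, ih, ← PySem.List.sum_map_add_int]

-- A's inner loop for an entry p of a duplicate-free association list
-- equals B's per-entry sum of (count - 1)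
theorem per_entry (L : List (Int × List Int)) (hk : (L.map Prod.fst).Nodup)
    (p : Int × List Int) (hp : p ∈ L) :
    L.foldl
      (fun overlap q =>
        if q.1 == p.1 then overlap
        else overlap +
          ((PySem.Set.inter (PySem.Set.ofList p.2) (PySem.Set.ofList q.2)).length : Int))
      0
    = ((PySem.Set.ofList p.2).map
        (fun l => ((L.countP (fun q => decide (l ∈ q.2)) : Nat) : Int) - 1)).sum := by
  -- abbreviations
  set g : (Int × List Int) → Int :=
    fun q => ((PySem.Set.inter (PySem.Set.ofList p.2) (PySem.Set.ofList q.2)).length : Int) with hg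
  -- turn the skip-loop into a sum
  have hfun : (fun (ov : Int) q => if q.1 == p.1 then ov else ov + g q)
      = (fun ov q => ov + (if q.1 == p.1 then 0 else g q)) := by
    funext ov q; by_cases h : q.1 == p.1 <;> simp [h]
  rw [hfun, PySem.List.foldl_add, zero_add]
  -- split L around p
  obtain ⟨l1, l2, rfl⟩ := List.append_of_mem hp
  have hk' := hk
  simp only [List.map_append, List.map_cons, List.nodup_append] at hk'
  have h1 : ∀ q ∈ l1, ¬ (q.1 = p.1) := by
    intro q hq he
    have hm : p.1 ∈ List.map Prod.fst l1 := by
      rw [← he]; exact List.mem_map_of_mem hq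
    exact hk'.2.2 p.1 hm p.1 (by simp) rfl
  have h2 : ∀ q ∈ l2, ¬ (q.1 = p.1) := by
    intro q hq he
    have hm : p.1 ∈ List.map Prod.fst l2 := by
      rw [← he]; exact List.mem_map_of_mem hq
    exact (List.nodup_cons.1 hk'.2.1).1 hm
  -- the skip-sum drops exactly the p term
  have hmap1 : l1.map (fun q => if q.1 == p.1 then 0 else g q) = l1.map g := by
    apply List.map_congr_left; intro q hq
    simp [beq_iff_eq, h1 q hq]
  have hmap2 : l2.map (fun q => if q.1 == p.1 then 0 else g q) = l2.map g := by
    apply List.map_congr_left; intro q hq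
    simp [beq_iff_eq, h2 q hq]
  simp only [List.map_append, List.map_cons, List.sum_append, List.sum_cons,
    hmap1, hmap2, beq_self_eq_true, if_pos, zero_add]
  -- indicator form of g
  have hgind : ∀ q, g q = ((PySem.Set.ofList p.2).map (fun l => if l ∈ q.2 then (1 : Int) else 0)).sum :=
    fun q => inter_len_eq p.2 q.2
  -- per-part double counting
  have hpart : ∀ (M : List (Int × List Int)),
      (M.map g).sum
      = ((PySem.Set.ofList p.2).map
          (fun l => ((M.countP (fun q => decide (l ∈ q.2)) : Nat) : Int))).sum := by
    intro M
    calc (M.map g).sum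
        = (M.map (fun q => ((PySem.Set.ofList p.2).map
            (fun l => if l ∈ q.2 then (1 : Int) else 0)).sum)).sum := by
          congr 1; exact List.map_congr_left (fun q _ => hgind q)
      _ = ((PySem.Set.ofList p.2).map (fun l => (M.map
            (fun q => if l ∈ q.2 then (1 : Int) else 0)).sum)).sum :=
          sum_swap_list M (PySem.Set.ofList p.2) (fun l q => if l ∈ q.2 then (1 : Int) else 0)
      _ = ((PySem.Set.ofList p.2).map
            (fun l => ((M.countP (fun q => decide (l ∈ q.2)) : Nat) : Int))).sum := by
          congr 1; apply List.map_congr_left; intro l _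
          have := PySem.List.sum_map_ite_one_zero (fun q : Int × List Int => decide (l ∈ q.2)) M
          simpa using this
  rw [hpart l1, hpart l2]
  -- RHS: split the count over l1 ++ p :: l2 and pull out the constant 1
  have hrhs : ((PySem.Set.ofList p.2).map
      (fun l => (((l1 ++ p :: l2).countP (fun q => decide (l ∈ q.2)) : Nat) : Int) - 1)).sum
      = ((PySem.Set.ofList p.2).map
          (fun l => ((l1.countP (fun q => decide (l ∈ q.2)) : Nat) : Int))).sum
        + ((PySem.Set.ofList p.2).map
          (fun l => ((l2.countP (fun q => decide (l ∈ q.2)) : Nat) : Int))).sum := by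
    have hmemp : ∀ l ∈ PySem.Set.ofList p.2, l ∈ p.2 :=
      fun l hl => (PySem.Set.mem_ofList p.2 l).1 hl
    have hptw : ((PySem.Set.ofList p.2).map
        (fun l => (((l1 ++ p :: l2).countP (fun q => decide (l ∈ q.2)) : Nat) : Int) - 1))
        = ((PySem.Set.ofList p.2).map
          (fun l => ((l1.countP (fun q => decide (l ∈ q.2)) : Nat) : Int)
            + ((l2.countP (fun q => decide (l ∈ q.2)) : Nat) : Int))) := by
      apply List.map_congr_left; intro l hl
      rw [List.countP_append, List.countP_cons]
      simp only [decide_eq_true_eq]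
      rw [if_pos (hmemp l hl)]
      push_cast; ring
    rw [hptw, PySem.List.sum_map_add_int]
  rw [hrhs]

-- the whole-input equivalence
theorem ports_agree (d : List (Int × List Int)) :
    check_overlap_factors d = check_overlap_factors_alt d := by
  unfold check_overlap_factors check_overlap_factors_alt
  have hk : (((PySem.Dict.ofList d).items).map Prod.fst).Nodup :=
    PySem.Dict.nodup_keys_ofList d
  rw [PySem.Dict.items_foldl_insert_fresh ((PySem.Dict.ofList d).items) Prod.fst _
        PySem.Dict.empty (fun a _ => PySem.Dict.contains_empty a.1) hk]
  simp only [PySem.Dict.empty, List.nil_append]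
  apply List.map_congr_left
  intro p hp
  rw [per_entry ((PySem.Dict.ofList d).items) hk p hp]
  congr 1
  congr 1
  apply List.map_congr_left
  intro l _
  rw [countDict_getD]
  have : (PySem.Dict.ofList d).values = ((PySem.Dict.ofList d).items).map Prod.snd := rfl
  rw [this, List.countP_map]
  simp [Function.comp_def,
    (show (PySem.Dict.mk ([] : List (Int × Int))).getD l 0 = 0 from rfl)]

-- ===== VERDICT (by name: the statement is the Claim_ definition above) =====
theorem check_overlap_factors_spec : Claim_equal_check_overlap_factors := by
  intro d _
  unfold Spec_check_overlap_factors
  exact ports_agree d
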